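-- pv_equiv track=rewrite | github.com/RonanCesar-ls/desafio-cronowise-RonanCesar | src/DeteccaoAnomailia.py | verificar_alertas
-- ===== SOURCE A (Python) =====
-- def verificar_alertas(tempos):
--     alertas = []
--     lentos = 0
--
--     for i, tempo in enumerate(tempos):
--         if tempo > 2000:
--             lentos += 1
--         else:
--             lentos = 0
--
--         if lentos == 3:
--             alertas.append(i)
--             lentos = 0
--
--     return alertas
-- ===== SOURCE B (Python) =====
-- def verificar_alertas(tempos):
--     # pass 1: collect maximal runs of consecutive slow times as (start, length)
--     runs = []
--     start = -1
--     for i, t in enumerate(tempos):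
--         if t > 2000:
--             if start < 0:
--                 start = i
--         elif start >= 0:
--             runs.append((start, i - start))
--             start = -1
--     if start >= 0:
--         runs.append((start, len(tempos) - start))
--     # pass 2: every third position within each run, by arithmetic
--     return [s + 3 * k - 1 for (s, L) in runs for k in range(1, L // 3 + 1)]
-- ===== Notes on version B (the rewrite author's own statement) =====
-- stated objective: alternative
-- what changed: Replaces the incremental counter-with-reset by a two-pass shape: first collect the maximal runs of consecutive slow times as (start, length) pairs, then emit indices start+3k-1 for k=1..length//3 by arithmetic over each run.
import Mathlib
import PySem

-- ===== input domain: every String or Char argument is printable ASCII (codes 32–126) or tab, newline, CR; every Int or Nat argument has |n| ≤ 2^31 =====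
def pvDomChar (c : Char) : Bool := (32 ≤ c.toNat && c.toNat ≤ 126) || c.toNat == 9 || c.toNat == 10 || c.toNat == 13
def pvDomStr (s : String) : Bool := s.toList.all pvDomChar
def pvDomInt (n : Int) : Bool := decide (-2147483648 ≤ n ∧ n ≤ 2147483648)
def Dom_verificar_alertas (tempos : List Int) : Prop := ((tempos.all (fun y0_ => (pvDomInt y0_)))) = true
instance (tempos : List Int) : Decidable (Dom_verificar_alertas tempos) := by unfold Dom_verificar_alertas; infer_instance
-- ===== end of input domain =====

-- B replaces A's counter-with-reset by a runs-then-arithmetic decomposition (alternative, same cost).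

-- ===== PORT A =====
-- loop body of A: counter incremented on slow, reset on fast, alert and reset at 3
def stepA (st : List Int × Int) (p : Int × Int) : List Int × Int :=
  let lentos := if p.2 > 2000 then st.2 + 1 else 0
  if lentos = 3 then (st.1 ++ [p.1], 0) else (st.1, lentos)

def verificar_alertas (tempos : List Int) : List Int :=
  ((PySem.List.enumerate tempos 0).foldl stepA ([], 0)).1

-- ===== PORT B =====
-- pass-1 body of B: track current run start (-1 = no run), close a run on a fast element
def stepB (st : List (Int × Int) × Int) (p : Int × Int) : List (Int × Int) × Int :=
  if p.2 > 2000 then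
    (if st.2 < 0 then (st.1, p.1) else st)
  else
    (if 0 ≤ st.2 then (st.1 ++ [(st.2, p.1 - st.2)], -1) else st)

-- flush the still-open run at end of list
def finishB (n : Int) (st : List (Int × Int) × Int) : List (Int × Int) :=
  if 0 ≤ st.2 then st.1 ++ [(st.2, n - st.2)] else st.1

-- pass 2 of B: the comprehension over runs
def alertsOf (runs : List (Int × Int)) : List Int :=
  runs.flatMap (fun r =>
    (PySem.List.pyRange 1 (PySem.Int.floordiv r.2 3 + 1) 1).map (fun k => r.1 + 3 * k - 1))

def verificar_alertas_alt (tempos : List Int) : List Int :=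
  alertsOf (finishB (tempos.length : Int)
    ((PySem.List.enumerate tempos 0).foldl stepB ([], -1)))

-- ===== PRECONDITION & SPEC =====
def Spec_verificar_alertas (tempos : List Int) (out : List Int) : Prop := out = verificar_alertas_alt tempos
instance (tempos : List Int) (out : List Int) : Decidable (Spec_verificar_alertas tempos out) := by unfold Spec_verificar_alertas; infer_instance

-- ===== CLAIM (what is proved, stated in full; the proofs are below) =====
def Claim_equal_verificar_alertas : Prop := ∀ (tempos : List Int), Dom_verificar_alertas tempos → Spec_verificar_alertas tempos (verificar_alertas tempos)

-- ===== LEMMAS AND PROOFS =====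

theorem alertsOf_append (r s : List (Int × Int)) : alertsOf (r ++ s) = alertsOf r ++ alertsOf s := by
  simp [alertsOf]

-- the loop invariant relating A's (alerts, counter) to B's (runs, start) at position i
def LoopInv (i c : Int) (acc : List Int) (runs : List (Int × Int)) (start : Int) : Prop :=
  (start < 0 ∧ c = 0 ∧ acc = alertsOf runs) ∨
  (0 ≤ start ∧ start < i ∧ c = PySem.Int.mod (i - start) 3 ∧
    acc = alertsOf (runs ++ [(start, i - start)]))

theorem alertsOf_run_succ (s L : Int) (hL : 0 ≤ L) :
    alertsOf [(s, L + 1)] =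
      alertsOf [(s, L)] ++ (if PySem.Int.mod (L + 1) 3 = 0 then [s + L] else []) := by
  simp only [alertsOf, List.flatMap_cons, List.flatMap_nil, List.append_nil]
  rw [PySem.Int.mod_eq_emod_of_pos (by norm_num),
      PySem.Int.floordiv_eq_ediv_of_pos (by norm_num),
      PySem.Int.floordiv_eq_ediv_of_pos (by norm_num)]
  by_cases h : (L + 1) % 3 = 0
  · have h1 : (L + 1) / 3 + 1 = (L / 3 + 1) + 1 := by omega
    rw [h1, PySem.List.pyRange_one_succ_right (by omega)]
    simp only [if_pos h, List.map_append, List.map_cons, List.map_nil]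
    congr 2
    omega
  · have h1 : (L + 1) / 3 = L / 3 := by omega
    simp [h, h1]

theorem loop_invariant (xs : List Int) :
    ∀ (i c : Int) (acc : List Int) (runs : List (Int × Int)) (start : Int),
      0 ≤ i → LoopInv i c acc runs start →
      ((PySem.List.enumerate xs i).foldl stepA (acc, c)).1 =
        alertsOf (finishB (i + xs.length) ((PySem.List.enumerate xs i).foldl stepB (runs, start))) := by
  induction xs with
  | nil =>
    intro i c acc runs start _ hinv
    simp only [PySem.List.enumerate_nil, List.foldl_nil, List.length_nil, Nat.cast_zero,
      add_zero, finishB]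
    rcases hinv with ⟨h1, _, h3⟩ | ⟨h1, h2, _, h4⟩
    · rw [if_neg (by omega)]; exact h3
    · rw [if_pos (by omega)]; exact h4
  | cons t rest ih =>
    intro i c acc runs start hi hinv
    rw [PySem.List.enumerate_cons]
    simp only [List.foldl_cons, List.length_cons]
    rw [show ((i : Int) + (rest.length + 1 : Nat)) = (i + 1) + rest.length by push_cast; ring]
    by_cases ht : t > 2000
    · -- slow element
      rcases hinv with ⟨h1, h2, h3⟩ | ⟨h1, h2, h3, h4⟩
      · -- no open run: start one at i
        have hA : stepA (acc, c) (i, t) = (acc, 1) := by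
          simp [stepA, ht, h2]
        have hB : stepB (runs, start) (i, t) = (runs, i) := by
          simp [stepB, ht, h1]
        rw [hA, hB]
        apply ih _ _ _ _ _ (by omega)
        right
        refine ⟨hi, by omega, ?_, ?_⟩
        · rw [show (i : Int) + 1 - i = 1 by ring,
              PySem.Int.mod_eq_emod_of_pos (by norm_num)]
          decide
        · rw [alertsOf_append, h3]
          have : alertsOf [(i, i + 1 - i)] = [] := by
            rw [show (i : Int) + 1 - i = 1 by ring]
            simp only [alertsOf, List.flatMap_cons, List.flatMap_nil, List.append_nil]
            rw [show PySem.Int.floordiv 1 3 + 1 = (1 : Int) by decide,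
                PySem.List.pyRange_one_eq_nil (by norm_num)]
            rfl
          rw [this, List.append_nil]
      · -- open run of length L = i - start
        have hL : 0 < i - start := by omega
        have hc : c = (i - start) % 3 := by
          rw [h3, PySem.Int.mod_eq_emod_of_pos (by norm_num)]
        have hsucc := alertsOf_run_succ start (i - start) (by omega)
        rw [PySem.Int.mod_eq_emod_of_pos (by norm_num)] at hsucc
        have hB : stepB (runs, start) (i, t) = (runs, start) := by
          simp only [stepB, if_pos ht]
          rw [if_neg (by omega : ¬ (start : Int) < 0)]
        have hrw : start + (i - start) = i := by ring
        have hacc' : alertsOf (runs ++ [(start, i + 1 - start)]) =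
            acc ++ (if (i - start + 1) % 3 = 0 then [i] else []) := by
          rw [show (i : Int) + 1 - start = (i - start) + 1 by ring,
              alertsOf_append, hsucc, hrw, h4, alertsOf_append, List.append_assoc]
        by_cases hc2 : c = 2
        · have hA : stepA (acc, c) (i, t) = (acc ++ [i], 0) := by
            simp [stepA, ht, hc2]
          rw [hA, hB]
          apply ih _ _ _ _ _ (by omega)
          right
          refine ⟨h1, by omega, ?_, ?_⟩
          · rw [PySem.Int.mod_eq_emod_of_pos (by norm_num)]; omega
          · rw [hacc', if_pos (by omega)]
        · have hcr : c + 1 ≠ 3 := by omega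
          have hA : stepA (acc, c) (i, t) = (acc, c + 1) := by
            simp only [stepA, if_pos ht]
            rw [if_neg hcr]
          rw [hA, hB]
          apply ih _ _ _ _ _ (by omega)
          right
          have hcb : 0 ≤ c ∧ c < 3 := by
            constructor <;> [exact hc ▸ Int.emod_nonneg _ (by norm_num); omega]
          refine ⟨h1, by omega, ?_, ?_⟩
          · rw [PySem.Int.mod_eq_emod_of_pos (by norm_num)]; omega
          · rw [hacc', if_neg (by omega), List.append_nil]
    · -- fast element
      rcases hinv with ⟨h1, h2, h3⟩ | ⟨h1, h2, h3, h4⟩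
      · have hA : stepA (acc, c) (i, t) = (acc, 0) := by simp [stepA, ht]
        have hB : stepB (runs, start) (i, t) = (runs, start) := by
          simp only [stepB, if_neg ht]
          rw [if_neg (by omega : ¬ (0 : Int) ≤ start)]
        rw [hA, hB]
        exact ih (i+1) 0 acc runs start (by omega) (Or.inl ⟨h1, rfl, h3⟩)
      · have hA : stepA (acc, c) (i, t) = (acc, 0) := by simp [stepA, ht]
        have hB : stepB (runs, start) (i, t) = (runs ++ [(start, i - start)], -1) := by
          simp [stepB, ht, h1]
        rw [hA, hB]
        exact ih (i+1) 0 acc (runs ++ [(start, i - start)]) (-1) (by omega)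
          (Or.inl ⟨by norm_num, rfl, h4⟩)

-- ===== VERDICT (by name: the statement is the Claim_ definition above) =====
theorem verificar_alertas_spec : Claim_equal_verificar_alertas := by
  intro tempos _
  unfold Spec_verificar_alertas verificar_alertas verificar_alertas_alt
  have := loop_invariant tempos 0 0 [] [] (-1) (by norm_num) (Or.inl ⟨by norm_num, rfl, rfl⟩)
  simpa using this
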